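-- pv_equiv track=rewrite | github.com/CARBON-XXX/SEDACV6.0-Semantic-Entropy-Dynamic-Acceleration-Core | patch_vllm_surgical.py | _strip_sedac_blocks
-- ===== SOURCE A (Python) =====
-- def _strip_sedac_blocks(lines: list[str]) -> list[str]:
--     out = []
--     i = 0
--     while i < len(lines):
--         line = lines[i]
--         stripped = line.strip()
--
--         if stripped.startswith("SEDAC_PATCH_VERSION ="):
--             i += 1
--             continue
--
--         if stripped.startswith("self._sedac_patch_begin ="):
--             i += 1
--             while i < len(lines):
--                 if lines[i].strip().startswith("self._sedac_patch_end ="):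
--                     i += 1
--                     break
--                 i += 1
--             continue
--
--         if stripped.startswith("_sedac_patch_forward_begin ="):
--             i += 1
--             while i < len(lines):
--                 if lines[i].strip().startswith("_sedac_patch_forward_end ="):
--                     i += 1
--                     break
--                 i += 1
--             continue
--
--         if stripped in ("# --- SEDAC DECODER PATCH ---", "# --- SEDAC DECODER PATCH v2 ---", "# --- SEDAC DECODER PATCH v6 ---"):
--              i += 1
--              while i < len(lines):
--                  if lines[i].strip() == "# ---------------------------":
--                      i += 1
--                      break
--                  i += 1
--              continue
--
--         if stripped.startswith("_sedac_original_decoder_forward ="):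
--             i += 1
--             continue
--
--         if stripped.startswith("Qwen2DecoderLayer.forward = _sedac_decoder_forward"):
--             i += 1
--             continue
--
--         out.append(line)
--         i += 1
--     return out
-- ===== SOURCE B (Python) =====
-- def _strip_sedac_blocks(lines: list[str]) -> list[str]:
--     # single-pass state machine: mode 0 = emitting, 1/2/3 = inside one of the three block kinds
--     out = []
--     mode = 0
--     for line in lines:
--         s = line.strip()
--         if mode == 1:
--             if s.startswith("self._sedac_patch_end ="):
--                 mode = 0
--         elif mode == 2:
--             if s.startswith("_sedac_patch_forward_end ="):
--                 mode = 0
--         elif mode == 3: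
--             if s == "# ---------------------------":
--                 mode = 0
--         elif s.startswith("SEDAC_PATCH_VERSION ="):
--             pass
--         elif s.startswith("self._sedac_patch_begin ="):
--             mode = 1
--         elif s.startswith("_sedac_patch_forward_begin ="):
--             mode = 2
--         elif s in ("# --- SEDAC DECODER PATCH ---", "# --- SEDAC DECODER PATCH v2 ---", "# --- SEDAC DECODER PATCH v6 ---"):
--             mode = 3
--         elif s.startswith("_sedac_original_decoder_forward ="):
--             pass
--         elif s.startswith("Qwen2DecoderLayer.forward = _sedac_decoder_forward"):
--             pass
--         else:
--             out.append(line)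
--     return out
-- ===== Notes on version B (the rewrite author's own statement) =====
-- stated objective: simpler
-- what changed: Replaces the index-based while loop with nested inner scanning whiles by a single forward pass carrying one mode variable (emitting / inside one of the three block kinds).
import Mathlib
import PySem

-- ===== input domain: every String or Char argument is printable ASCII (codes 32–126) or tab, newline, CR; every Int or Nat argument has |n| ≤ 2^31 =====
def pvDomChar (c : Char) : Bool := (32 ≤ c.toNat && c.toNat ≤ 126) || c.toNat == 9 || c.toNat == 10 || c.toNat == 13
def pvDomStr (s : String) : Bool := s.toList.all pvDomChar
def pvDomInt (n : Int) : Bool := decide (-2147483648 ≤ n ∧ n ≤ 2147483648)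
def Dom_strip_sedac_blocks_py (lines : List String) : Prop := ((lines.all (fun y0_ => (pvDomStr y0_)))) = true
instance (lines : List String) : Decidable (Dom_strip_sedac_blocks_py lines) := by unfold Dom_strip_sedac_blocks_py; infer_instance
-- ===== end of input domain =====

-- B rewrites A's index-based while loop with nested inner scanning whiles as a single
-- forward pass carrying one mode variable (objective: simpler).

-- ===== PORT A =====
-- A's inner 'while i < len(lines): … i += 1' scans: consume lines up to and including the
-- first one satisfying p (or everything if none does), returning the remaining suffix.
def pySkipUntil (p : String → Bool) : List String → List String
  | [] => []
  | l :: rest => if p l then rest else pySkipUntil p rest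

theorem pySkipUntil_length_le (p : String → Bool) (l : List String) :
    (pySkipUntil p l).length ≤ l.length := by
  induction l with
  | nil => simp [pySkipUntil]
  | cons x rest ih =>
    simp only [pySkipUntil, List.length_cons]
    split <;> omega

def strip_sedac_blocks_py (lines : List String) : List String :=
  match lines with
  | [] => []
  | line :: rest =>
    let s := PySem.Str.strip line
    if PySem.Str.startswith s "SEDAC_PATCH_VERSION =" then
      strip_sedac_blocks_py rest
    else if PySem.Str.startswith s "self._sedac_patch_begin =" then
      strip_sedac_blocks_py (pySkipUntil (fun l => PySem.Str.startswith (PySem.Str.strip l) "self._sedac_patch_end =") rest)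
    else if PySem.Str.startswith s "_sedac_patch_forward_begin =" then
      strip_sedac_blocks_py (pySkipUntil (fun l => PySem.Str.startswith (PySem.Str.strip l) "_sedac_patch_forward_end =") rest)
    else if s = "# --- SEDAC DECODER PATCH ---" ∨ s = "# --- SEDAC DECODER PATCH v2 ---" ∨ s = "# --- SEDAC DECODER PATCH v6 ---" then
      strip_sedac_blocks_py (pySkipUntil (fun l => PySem.Str.strip l == "# ---------------------------") rest)
    else if PySem.Str.startswith s "_sedac_original_decoder_forward =" then
      strip_sedac_blocks_py rest
    else if PySem.Str.startswith s "Qwen2DecoderLayer.forward = _sedac_decoder_forward" then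
      strip_sedac_blocks_py rest
    else
      line :: strip_sedac_blocks_py rest
termination_by lines.length
decreasing_by
  all_goals simp only [List.length_cons]
  all_goals first
    | omega
    | exact Nat.lt_succ_of_le (pySkipUntil_length_le _ _)

-- ===== PORT B =====
-- the for-loop body of Source B; mode 0 = emitting, 1/2/3 = inside one of the three block kinds
def stripBGo (mode : Nat) : List String → List String
  | [] => []
  | line :: rest =>
    let s := PySem.Str.strip line
    if mode = 1 then
      if PySem.Str.startswith s "self._sedac_patch_end =" then stripBGo 0 rest else stripBGo 1 rest
    else if mode = 2 then
      if PySem.Str.startswith s "_sedac_patch_forward_end =" then stripBGo 0 rest else stripBGo 2 rest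
    else if mode = 3 then
      if s = "# ---------------------------" then stripBGo 0 rest else stripBGo 3 rest
    else if PySem.Str.startswith s "SEDAC_PATCH_VERSION =" then
      stripBGo 0 rest
    else if PySem.Str.startswith s "self._sedac_patch_begin =" then
      stripBGo 1 rest
    else if PySem.Str.startswith s "_sedac_patch_forward_begin =" then
      stripBGo 2 rest
    else if s = "# --- SEDAC DECODER PATCH ---" ∨ s = "# --- SEDAC DECODER PATCH v2 ---" ∨ s = "# --- SEDAC DECODER PATCH v6 ---" then
      stripBGo 3 rest
    else if PySem.Str.startswith s "_sedac_original_decoder_forward =" then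
      stripBGo 0 rest
    else if PySem.Str.startswith s "Qwen2DecoderLayer.forward = _sedac_decoder_forward" then
      stripBGo 0 rest
    else
      line :: stripBGo 0 rest

def strip_sedac_blocks_py_alt (lines : List String) : List String := stripBGo 0 lines

-- ===== PRECONDITION & SPEC =====
def Spec_strip_sedac_blocks_py (lines : List String) (out : List String) : Prop := out = strip_sedac_blocks_py_alt lines
instance (lines : List String) (out : List String) : Decidable (Spec_strip_sedac_blocks_py lines out) := by unfold Spec_strip_sedac_blocks_py; infer_instance

-- ===== CLAIM (what is proved, stated in full; the proofs are below) =====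
def Claim_equal_strip_sedac_blocks_py : Prop := ∀ (lines : List String), Dom_strip_sedac_blocks_py lines → Spec_strip_sedac_blocks_py lines (strip_sedac_blocks_py lines)

-- ===== LEMMAS AND PROOFS =====
theorem stripBGo_one (l : List String) :
    stripBGo 1 l = stripBGo 0 (pySkipUntil (fun x => PySem.Str.startswith (PySem.Str.strip x) "self._sedac_patch_end =") l) := by
  induction l with
  | nil => rfl
  | cons x rest ih =>
    simp [stripBGo, pySkipUntil]
    split <;> simp [ih]

theorem stripBGo_two (l : List String) :
    stripBGo 2 l = stripBGo 0 (pySkipUntil (fun x => PySem.Str.startswith (PySem.Str.strip x) "_sedac_patch_forward_end =") l) := by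
  induction l with
  | nil => rfl
  | cons x rest ih =>
    simp [stripBGo, pySkipUntil]
    split <;> simp [ih]

theorem stripBGo_three (l : List String) :
    stripBGo 3 l = stripBGo 0 (pySkipUntil (fun x => PySem.Str.strip x == "# ---------------------------") l) := by
  induction l with
  | nil => rfl
  | cons x rest ih =>
    simp [stripBGo, pySkipUntil]
    split <;> simp_all

set_option maxHeartbeats 1000000 in
theorem stripA_eq_B (n : Nat) : ∀ (lines : List String), lines.length ≤ n →
    strip_sedac_blocks_py lines = stripBGo 0 lines := by
  induction n with
  | zero =>
    intro lines h
    have : lines = [] := List.eq_nil_of_length_eq_zero (Nat.le_zero.mp h)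
    subst this; rw [strip_sedac_blocks_py]; rfl
  | succ n ih =>
    intro lines h
    match lines with
    | [] => rw [strip_sedac_blocks_py]; rfl
    | line :: rest =>
      simp only [List.length_cons, Nat.succ_le_succ_iff] at h
      rw [strip_sedac_blocks_py]
      simp only [stripBGo]
      split_ifs <;> try exact (‹False›).elim
      · exact ih rest h
      · exact (ih _ (le_trans (pySkipUntil_length_le _ _) h)).trans (stripBGo_one rest).symm
      · exact (ih _ (le_trans (pySkipUntil_length_le _ _) h)).trans (stripBGo_two rest).symm
      · exact (ih _ (le_trans (pySkipUntil_length_le _ _) h)).trans (stripBGo_three rest).symm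
      · exact ih rest h
      · exact ih rest h
      · rw [ih rest h]

-- ===== VERDICT (by name: the statement is the Claim_ definition above) =====
theorem strip_sedac_blocks_py_spec : Claim_equal_strip_sedac_blocks_py := by
  intro lines _
  unfold Spec_strip_sedac_blocks_py strip_sedac_blocks_py_alt
  exact stripA_eq_B lines.length lines le_rfl
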